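-- pv_equiv track=rewrite | github.com/innodatalabs/lxmlx | lxmlx/events_json.py | merge_text
-- ===== SOURCE A (Python) =====
-- TEXT    = 'text'
--
-- def merge_text(events):
--     """merges each run of successive text events into one text event"""
--     text = []
--     for obj in events:
--         if obj['type'] == TEXT:
--             text.append(obj['text'])
--         else:
--             if text:
--                 yield {'type': TEXT, 'text': ''.join(text)}
--                 text.clear()
--             yield obj
--     if text:
--         yield {'type': TEXT, 'text': ''.join(text)}
-- ===== SOURCE B (Python) =====
-- TEXT = 'text'
--
-- def merge_text(events):
--     """merges each run of successive text events into one text event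
--
--     Run-scanning version: materialize the events, then walk an index; on a
--     text event scan forward to the end of the run of text events, emit one
--     merged event for the whole run, and jump past it.
--     """
--     events = list(events)
--     n = len(events)
--     i = 0
--     while i < n:
--         obj = events[i]
--         if obj['type'] == TEXT:
--             j = i
--             while j < n and events[j]['type'] == TEXT:
--                 j += 1
--             yield {'type': TEXT, 'text': ''.join(e['text'] for e in events[i:j])}
--             i = j
--         else:
--             yield obj
--             i += 1
-- ===== Notes on version B (the rewrite author's own statement) =====
-- stated objective: alternative
-- what changed: Replaces the flush-on-boundary text buffer with run extraction: an index scan finds each maximal run of text events and emits its join directly, so no accumulator is carried across iterations.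
import Mathlib
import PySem

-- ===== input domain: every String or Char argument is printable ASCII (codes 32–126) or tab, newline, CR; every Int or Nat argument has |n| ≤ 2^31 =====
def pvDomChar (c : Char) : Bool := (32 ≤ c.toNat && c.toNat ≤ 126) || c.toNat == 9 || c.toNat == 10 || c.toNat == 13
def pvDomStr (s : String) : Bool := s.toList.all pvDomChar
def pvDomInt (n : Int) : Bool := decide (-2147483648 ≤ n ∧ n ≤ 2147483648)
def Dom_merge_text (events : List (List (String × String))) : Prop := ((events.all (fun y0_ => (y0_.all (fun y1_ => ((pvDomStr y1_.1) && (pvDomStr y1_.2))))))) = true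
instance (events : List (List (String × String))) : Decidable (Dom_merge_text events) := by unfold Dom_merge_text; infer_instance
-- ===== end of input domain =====

-- B replaces A's flush-on-boundary text buffer with direct extraction of each maximal run
-- of text events (alternative decomposition; return-value equivalence of the generators' yields).


-- ===== PORT A =====
-- obj['type'] / obj['text'] are dict lookups; Python raises KeyError when the key is
-- missing — those inputs are excluded by Pre_merge_text, so getD's default is never hit there.
def pvTypeOf (e : List (String × String)) : String :=
  PySem.Dict.getD (PySem.Dict.mk e) "type" ""

def pvTextOf (e : List (String × String)) : String :=
  PySem.Dict.getD (PySem.Dict.mk e) "text" ""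

-- the loop of A: state = pending text buffer; yields become list elements in order
def pvMergeA (text : List String) : List (List (String × String)) → List (List (String × String))
  | [] => if text.isEmpty then [] else [[("type", "text"), ("text", PySem.Str.join "" text)]]
  | obj :: rest =>
    if pvTypeOf obj = "text" then
      pvMergeA (text ++ [pvTextOf obj]) rest
    else
      (if text.isEmpty then [] else [[("type", "text"), ("text", PySem.Str.join "" text)]])
        ++ obj :: pvMergeA [] rest

def merge_text (events : List (List (String × String))) : List (List (String × String)) :=
  pvMergeA [] events

-- ===== PORT B =====
def pvIsText (e : List (String × String)) : Bool :=
  PySem.Dict.getD (PySem.Dict.mk e) "type" "" == "text"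

-- the index scan of Source B: the inner `while j < n and events[j]['type'] == TEXT` run
-- boundary is takeWhile/dropWhile over the suffix; yields become list elements in order
def merge_text_alt (events : List (List (String × String))) : List (List (String × String)) :=
  match events with
  | [] => []
  | obj :: rest =>
    if pvIsText obj then
      [("type", "text"),
       ("text", PySem.Str.join "" (((obj :: rest).takeWhile pvIsText).map
          (fun e => PySem.Dict.getD (PySem.Dict.mk e) "text" "")))]
        :: merge_text_alt ((obj :: rest).dropWhile pvIsText)
    else
      obj :: merge_text_alt rest
  termination_by events.length
  decreasing_by
  · simp only [List.dropWhile_cons, *, if_pos]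
    exact Nat.lt_succ_of_le (List.length_dropWhile_le _ _)
  · simp

-- ===== PRECONDITION & SPEC =====
-- Pre_ excludes exactly the inputs on which Python A raises KeyError: an event with no
-- 'type' key, or a text event with no 'text' key.
def Pre_merge_text (events : List (List (String × String))) : Prop :=
  (events.all (fun e =>
    (PySem.Dict.get? (PySem.Dict.mk e) "type").isSome &&
    (!(PySem.Dict.getD (PySem.Dict.mk e) "type" "" == "text") ||
      (PySem.Dict.get? (PySem.Dict.mk e) "text").isSome))) = true
instance (events : List (List (String × String))) : Decidable (Pre_merge_text events) := by
  unfold Pre_merge_text; infer_instance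

def pvWitness_merge_text : (List (List (String × String))) :=
  [[("type", "text"), ("text", "ab")], [("type", "p")], [("type", "text"), ("text", "c")]]

def Spec_merge_text (events : List (List (String × String))) (out : List (List (String × String))) : Prop := out = merge_text_alt events
instance (events : List (List (String × String))) (out : List (List (String × String))) : Decidable (Spec_merge_text events out) := by unfold Spec_merge_text; infer_instance

-- ===== CLAIM (what is proved, stated in full; the proofs are below) =====
def Claim_equal_merge_text : Prop := ∀ (events : List (List (String × String))), Dom_merge_text events → Pre_merge_text events → Spec_merge_text events (merge_text events)

-- ===== LEMMAS AND PROOFS =====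
theorem pvAlt_cons_neg (obj : List (String × String)) (rest : List (List (String × String)))
    (h : ¬ pvIsText obj = true) : merge_text_alt (obj :: rest) = obj :: merge_text_alt rest := by
  rw [merge_text_alt]
  simp [h]

def pvFlush (text : List String) : List (List (String × String)) :=
  if text.isEmpty then [] else [[("type", "text"), ("text", PySem.Str.join "" text)]]

theorem pvAlt_unfold (l : List (List (String × String))) :
    merge_text_alt l =
      pvFlush ((l.takeWhile pvIsText).map (fun e => PySem.Dict.getD (PySem.Dict.mk e) "text" ""))
        ++ merge_text_alt (l.dropWhile pvIsText) := by
  match l with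
  | [] => simp [merge_text_alt, pvFlush]
  | obj :: rest =>
    by_cases h : pvIsText obj
    · rw [merge_text_alt]
      simp [h, pvFlush]
    · simp [pvFlush, h]

theorem pvMergeA_eq (l : List (List (String × String))) : ∀ (text : List String),
    pvMergeA text l =
      pvFlush (text ++ (l.takeWhile pvIsText).map (fun e => PySem.Dict.getD (PySem.Dict.mk e) "text" ""))
        ++ merge_text_alt (l.dropWhile pvIsText) := by
  induction l with
  | nil => intro text; simp [pvMergeA, merge_text_alt, pvFlush]
  | cons obj rest ih =>
    intro text
    by_cases h : pvIsText obj
    · have htype : pvTypeOf obj = "text" := by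
        simpa [pvIsText, pvTypeOf] using h
      rw [pvMergeA]
      simp only [htype]
      rw [ih (text ++ [pvTextOf obj])]
      simp [h, pvTextOf]
    · have htype : ¬ pvTypeOf obj = "text" := by
        simpa [pvIsText, pvTypeOf] using h
      rw [pvMergeA]
      simp only [if_neg htype]
      rw [ih []]
      simp only [List.nil_append]
      rw [← pvAlt_unfold rest]
      simp [h, List.takeWhile_cons_of_neg, pvFlush, pvAlt_cons_neg obj rest h]

-- ===== VERDICT (by name: the statement is the Claim_ definition above) =====
theorem merge_text_spec : Claim_equal_merge_text := by
  intro events _ _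
  show merge_text events = merge_text_alt events
  rw [merge_text, pvMergeA_eq events []]
  simp only [List.nil_append]
  rw [← pvAlt_unfold]
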